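-- pv_equiv track=rewrite | github.com/becooq81/Algorithms | PyPy3/백준/Gold/9205. 맥주 마시면서 걸어가기/맥주 마시면서 걸어가기.py | bfs
-- ===== SOURCE A (Python) =====
-- from collections import deque
--
-- def bfs(start_x, start_y, coordinates, festival_x, festival_y):
--     queue = deque([(start_x, start_y)])
--     visited = set((start_x, start_y))
--
--     while queue:
--         curr_x, curr_y = queue.popleft()
--
--         if abs(curr_x - festival_x) + abs(curr_y - festival_y) <= 1000:
--             return "happy"
--
--         for x, y in coordinates:
--             if (x, y) not in visited:
--                 if abs(curr_x - x) + abs(curr_y - y) <= 1000: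
--                     queue.append((x, y))
--                     visited.add((x, y))
--
--     return "sad"
-- ===== SOURCE B (Python) =====
-- def bfs(start_x, start_y, coordinates, festival_x, festival_y):
--     # Fixpoint saturation: grow the reachable set by whole passes over the
--     # coordinate list until nothing new is added, then test the festival.
--     reach = [(start_x, start_y)]
--     changed = True
--     while changed:
--         changed = False
--         for p in coordinates:
--             if p not in reach and any(abs(p[0] - q[0]) + abs(p[1] - q[1]) <= 1000 for q in reach):
--                 reach.append(p)
--                 changed = True
--     if any(abs(q[0] - festival_x) + abs(q[1] - festival_y) <= 1000 for q in reach):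
--         return "happy"
--     return "sad"
-- ===== Notes on version B (the rewrite author's own statement) =====
-- stated objective: alternative
-- what changed: Replaces A's queue-based BFS with a visited set by a fixpoint saturation: whole passes over the coordinate list grow the reachable set until no pass adds a point, then the festival is tested against every reached point.
import Mathlib
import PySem

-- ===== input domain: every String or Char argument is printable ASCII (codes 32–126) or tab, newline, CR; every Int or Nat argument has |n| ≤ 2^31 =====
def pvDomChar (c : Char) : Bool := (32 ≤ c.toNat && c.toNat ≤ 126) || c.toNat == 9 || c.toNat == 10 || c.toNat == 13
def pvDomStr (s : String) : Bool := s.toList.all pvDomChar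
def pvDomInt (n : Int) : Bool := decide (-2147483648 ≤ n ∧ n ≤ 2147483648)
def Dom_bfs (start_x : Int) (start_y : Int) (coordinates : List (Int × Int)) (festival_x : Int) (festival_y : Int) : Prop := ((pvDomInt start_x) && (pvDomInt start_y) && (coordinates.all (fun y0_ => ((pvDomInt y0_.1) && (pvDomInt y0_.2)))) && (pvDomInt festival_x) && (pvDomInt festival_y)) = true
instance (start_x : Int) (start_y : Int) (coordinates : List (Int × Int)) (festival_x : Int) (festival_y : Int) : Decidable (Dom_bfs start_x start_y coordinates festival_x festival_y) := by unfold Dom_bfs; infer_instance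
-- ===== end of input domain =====

-- B replaces A's queue-based BFS by a whole-pass saturation fixpoint over the coordinate
-- list (objective: alternative decomposition, same exact return value; no speed claim).

-- ===== termination helpers (cited by name in the ports' decreasing_by) =====

/-- number of distinct coordinates not yet in `s` — the termination measure core -/
def pvUnvis (coords : List (Int × Int)) (s : List (Int × Int)) : Nat :=
  (coords.dedup.filter (fun p => !(decide (p ∈ s)))).length

theorem pv_length_filter_mono {α : Type} (f g : α → Bool) (h : ∀ x, g x = true → f x = true) :
    ∀ l : List α, (l.filter g).length ≤ (l.filter f).length := by
  intro l
  induction l with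
  | nil => simp
  | cons a t ih =>
    by_cases hg : g a = true
    · simp [hg, h a hg]; omega
    · simp only [List.filter_cons, Bool.not_eq_true] at *
      rw [if_neg (by simp [hg])]
      by_cases hf : f a = true
      · simp [hf]; omega
      · rw [if_neg (by simp [hf])]; exact ih

theorem pv_length_filter_lt {α : Type} (f g : α → Bool) (h : ∀ x, g x = true → f x = true)
    (p : α) (hf : f p = true) (hg : g p = false) :
    ∀ l : List α, p ∈ l → (l.filter g).length < (l.filter f).length := by
  intro l
  induction l with
  | nil => intro hm; cases hm
  | cons a t ih =>
    intro hm
    rcases List.mem_cons.mp hm with rfl | hmt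
    · rw [List.filter_cons, List.filter_cons, if_pos hf, if_neg (by simp [hg])]
      have := pv_length_filter_mono f g h t
      simp; omega
    · have := ih hmt
      by_cases hga : g a = true
      · rw [List.filter_cons, List.filter_cons, if_pos (h a hga), if_pos hga]
        simp; omega
      · rw [List.filter_cons (p := g), if_neg (by simp [hga])]
        by_cases hfa : f a = true
        · rw [List.filter_cons, if_pos hfa]; simp; omega
        · rw [List.filter_cons, if_neg (by simp [hfa])]; exact this

-- ===== PORT A =====
-- A's inner `for x, y in coordinates` loop body, as a fold step over (queue, visited).
def bfsPush (curr_x curr_y : Int) (acc : List (Int × Int) × PySem.Set (Int × Int))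
    (pt : Int × Int) : List (Int × Int) × PySem.Set (Int × Int) :=
  if PySem.Set.contains acc.2 pt then acc
  else if (curr_x - pt.1).natAbs + (curr_y - pt.2).natAbs ≤ 1000 then
    (acc.1 ++ [pt], PySem.Set.add acc.2 pt)
  else acc

def bfsStep (curr_x curr_y : Int) (coordinates : List (Int × Int))
    (st : List (Int × Int) × PySem.Set (Int × Int)) : List (Int × Int) × PySem.Set (Int × Int) :=
  coordinates.foldl (bfsPush curr_x curr_y) st

theorem bfsStep_measure (cx cy : Int) (coords : List (Int × Int)) :
    ∀ (l : List (Int × Int)) (st : List (Int × Int) × PySem.Set (Int × Int)),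
      (∀ p ∈ l, p ∈ coords) →
      pvUnvis coords (l.foldl (bfsPush cx cy) st).2 + (l.foldl (bfsPush cx cy) st).1.length ≤
        pvUnvis coords st.2 + st.1.length := by
  intro l
  induction l with
  | nil => intro st _; simp
  | cons pt t ih =>
    intro st hsub
    have hsub' : ∀ p ∈ t, p ∈ coords := fun p hp => hsub p (List.mem_cons_of_mem _ hp)
    simp only [List.foldl_cons]
    by_cases h1 : PySem.Set.contains st.2 pt = true
    · rw [bfsPush, if_pos h1]; exact ih st hsub'
    · by_cases h2 : (cx - pt.1).natAbs + (cy - pt.2).natAbs ≤ 1000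
      · rw [bfsPush, if_neg h1, if_pos h2]
        have hnm : pt ∉ st.2 := fun hm => h1 ((PySem.Set.contains_iff _ _).mpr hm)
        have key : pvUnvis coords (PySem.Set.add st.2 pt) < pvUnvis coords st.2 := by
          apply pv_length_filter_lt _ _ _ pt
          · simp [hnm]
          · simp [PySem.Set.mem_add]
          · exact List.mem_dedup.mpr (hsub pt (List.mem_cons_self))
          · intro x hx
            simp only [Bool.not_eq_true', decide_eq_false_iff_not] at *
            exact fun hmem => hx ((PySem.Set.mem_add _ _ _).mpr (Or.inl hmem))
        have := ih (st.1 ++ [pt], PySem.Set.add st.2 pt) hsub'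
        simp only [List.length_append, List.length_cons, List.length_nil] at *
        omega
      · rw [bfsPush, if_neg h1, if_neg h2]; exact ih st hsub'

-- A's `while queue` loop on state (queue, visited).
def bfsLoop (coordinates : List (Int × Int)) (festival_x festival_y : Int) :
    List (Int × Int) → PySem.Set (Int × Int) → String
  | [], _ => "sad"
  | (curr_x, curr_y) :: rest, visited =>
    if (curr_x - festival_x).natAbs + (curr_y - festival_y).natAbs ≤ 1000 then "happy"
    else
      let st := bfsStep curr_x curr_y coordinates (rest, visited)
      bfsLoop coordinates festival_x festival_y st.1 st.2
termination_by q v => pvUnvis coordinates v + q.length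
decreasing_by
  have := bfsStep_measure curr_x curr_y coordinates coordinates (rest, visited) (fun _ h => h)
  simp only [bfsStep] at *
  simp at *
  omega

-- Python's initial `visited = set((start_x, start_y))` is a set of the two INTS start_x and
-- start_y; the tuple test `(x, y) not in visited` can never match an int, so as a set of
-- pairs that initial visited is exactly the empty set.
def bfs (start_x : Int) (start_y : Int) (coordinates : List (Int × Int)) (festival_x : Int) (festival_y : Int) : String :=
  bfsLoop coordinates festival_x festival_y [(start_x, start_y)] (PySem.Set.empty)

-- ===== PORT B =====
-- B's inner `for p in coordinates` body: extend (reach, changed) by one candidate.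
def satPush (acc : List (Int × Int) × Bool) (p : Int × Int) : List (Int × Int) × Bool :=
  if p ∈ acc.1 then acc
  else if acc.1.any (fun q => decide ((p.1 - q.1).natAbs + (p.2 - q.2).natAbs ≤ 1000)) then
    (acc.1 ++ [p], true)
  else acc

def satPass (coordinates : List (Int × Int)) (st : List (Int × Int) × Bool) :
    List (Int × Int) × Bool :=
  coordinates.foldl satPush st

theorem satPass_mono : ∀ (l : List (Int × Int)) (st : List (Int × Int) × Bool)
    (x : Int × Int), x ∈ st.1 → x ∈ (l.foldl satPush st).1 := by
  intro l
  induction l with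
  | nil => intro st x hx; simpa using hx
  | cons a t ih =>
    intro st x hx
    simp only [List.foldl_cons]
    apply ih
    unfold satPush
    split
    · exact hx
    · split
      · exact List.mem_append_left _ hx
      · exact hx

theorem satPass_changed : ∀ (l : List (Int × Int)) (st : List (Int × Int) × Bool),
    st.2 = false → (l.foldl satPush st).2 = true →
    ∃ p ∈ l, p ∉ st.1 ∧ p ∈ (l.foldl satPush st).1 := by
  intro l
  induction l with
  | nil => intro st h1 h2; rw [List.foldl_nil] at h2; rw [h1] at h2; cases h2
  | cons a t ih =>
    intro st h1 h2
    simp only [List.foldl_cons] at *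
    by_cases hm : a ∈ st.1
    · rw [satPush, if_pos hm] at *
      obtain ⟨p, hp, hpn, hpr⟩ := ih st h1 h2
      exact ⟨p, List.mem_cons_of_mem _ hp, hpn, hpr⟩
    · by_cases hany : st.1.any
        (fun q => decide ((a.1 - q.1).natAbs + (a.2 - q.2).natAbs ≤ 1000)) = true
      · rw [satPush, if_neg hm, if_pos hany] at *
        refine ⟨a, List.mem_cons_self, hm, ?_⟩
        exact satPass_mono t (st.1 ++ [a], true) a (List.mem_append_right _ List.mem_cons_self)
      · rw [satPush, if_neg hm, if_neg hany] at *
        obtain ⟨p, hp, hpn, hpr⟩ := ih st h1 h2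
        exact ⟨p, List.mem_cons_of_mem _ hp, hpn, hpr⟩

-- B's `while changed` loop.
def satLoop (coordinates : List (Int × Int)) (reach : List (Int × Int)) : List (Int × Int) :=
  let st := satPass coordinates (reach, false)
  if h : st.2 = true then satLoop coordinates st.1 else st.1
termination_by pvUnvis coordinates reach
decreasing_by
  obtain ⟨p, hpl, hpn, hpr⟩ := satPass_changed coordinates (reach, false) rfl h
  have hmono := satPass_mono coordinates (reach, false)
  simp only [satPass, pvUnvis] at *
  exact pv_length_filter_lt _ _
    (fun x hx => by
      simp only [Bool.not_eq_true', decide_eq_false_iff_not] at *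
      exact fun hmem => hx (hmono x hmem))
    p (by simp [hpn]) (by simp [hpr]) _ (List.mem_dedup.mpr hpl)

def bfs_alt (start_x : Int) (start_y : Int) (coordinates : List (Int × Int)) (festival_x : Int) (festival_y : Int) : String :=
  let reach := satLoop coordinates [(start_x, start_y)]
  if reach.any (fun q => decide ((q.1 - festival_x).natAbs + (q.2 - festival_y).natAbs ≤ 1000))
  then "happy" else "sad"

-- ===== PRECONDITION & SPEC =====
def Spec_bfs (start_x : Int) (start_y : Int) (coordinates : List (Int × Int)) (festival_x : Int) (festival_y : Int) (out : String) : Prop := out = bfs_alt start_x start_y coordinates festival_x festival_y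
instance (start_x : Int) (start_y : Int) (coordinates : List (Int × Int)) (festival_x : Int) (festival_y : Int) (out : String) : Decidable (Spec_bfs start_x start_y coordinates festival_x festival_y out) := by unfold Spec_bfs; infer_instance

-- ===== CLAIM (what is proved, stated in full; the proofs are below) =====
def Claim_equal_bfs : Prop := ∀ (start_x : Int) (start_y : Int) (coordinates : List (Int × Int)) (festival_x : Int) (festival_y : Int), Dom_bfs start_x start_y coordinates festival_x festival_y → Spec_bfs start_x start_y coordinates festival_x festival_y (bfs start_x start_y coordinates festival_x festival_y)

-- ===== LEMMAS AND PROOFS =====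

/-- points reachable from the start by hops of Manhattan distance ≤ 1000 through coordinates -/
inductive PvReach (sx sy : Int) (coords : List (Int × Int)) : Int × Int → Prop where
  | start : PvReach sx sy coords (sx, sy)
  | step {q p : Int × Int} : PvReach sx sy coords q → p ∈ coords →
      (q.1 - p.1).natAbs + (q.2 - p.2).natAbs ≤ 1000 → PvReach sx sy coords p

/-- reachable from the state (queue, visited) through coordinate hops -/
inductive PvFrom (coords q v : List (Int × Int)) : Int × Int → Prop where
  | base_q {p : Int × Int} : p ∈ q → PvFrom coords q v p
  | base_v {p : Int × Int} : p ∈ v → PvFrom coords q v p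
  | step {r p : Int × Int} : PvFrom coords q v r → p ∈ coords →
      (r.1 - p.1).natAbs + (r.2 - p.2).natAbs ≤ 1000 → PvFrom coords q v p

/-- BFS loop invariant: every visited node is still queued, or is far from the
festival and fully expanded into visited -/
def pvInv (coords : List (Int × Int)) (fx fy : Int) (q v : List (Int × Int)) : Prop :=
  ∀ c ∈ v, c ∈ q ∨ (¬((c.1 - fx).natAbs + (c.2 - fy).natAbs ≤ 1000) ∧
    ∀ c' ∈ coords, (c.1 - c'.1).natAbs + (c.2 - c'.2).natAbs ≤ 1000 → c' ∈ v)

theorem bfsPush_mono1 (cx cy : Int) : ∀ (l : List (Int × Int))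
    (st : List (Int × Int) × PySem.Set (Int × Int)) (x : Int × Int),
    x ∈ st.1 → x ∈ (List.foldl (bfsPush cx cy) st l).1 := by
  intro l
  induction l with
  | nil => intro st x hx; simpa using hx
  | cons a t ih =>
    intro st x hx
    simp only [List.foldl_cons]
    apply ih
    unfold bfsPush
    split
    · exact hx
    · split
      · exact List.mem_append_left _ hx
      · exact hx

theorem bfsPush_mono2 (cx cy : Int) : ∀ (l : List (Int × Int))
    (st : List (Int × Int) × PySem.Set (Int × Int)) (x : Int × Int),
    x ∈ st.2 → x ∈ (List.foldl (bfsPush cx cy) st l).2 := by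
  intro l
  induction l with
  | nil => intro st x hx; simpa using hx
  | cons a t ih =>
    intro st x hx
    simp only [List.foldl_cons]
    apply ih
    unfold bfsPush
    split
    · exact hx
    · split
      · exact (PySem.Set.mem_add _ _ _).mpr (Or.inl hx)
      · exact hx

theorem bfsPush_sub1 (cx cy : Int) : ∀ (l : List (Int × Int))
    (st : List (Int × Int) × PySem.Set (Int × Int)) (x : Int × Int),
    x ∈ (List.foldl (bfsPush cx cy) st l).1 →
    x ∈ st.1 ∨ (x ∈ l ∧ (cx - x.1).natAbs + (cy - x.2).natAbs ≤ 1000) := by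
  intro l
  induction l with
  | nil => intro st x hx; exact Or.inl (by simpa using hx)
  | cons a t ih =>
    intro st x hx
    simp only [List.foldl_cons] at hx
    by_cases h1 : PySem.Set.contains st.2 a = true
    · rw [bfsPush, if_pos h1] at hx
      rcases ih st x hx with h | ⟨ht, hn⟩
      · exact Or.inl h
      · exact Or.inr ⟨List.mem_cons_of_mem _ ht, hn⟩
    · by_cases h2 : (cx - a.1).natAbs + (cy - a.2).natAbs ≤ 1000
      · rw [bfsPush, if_neg h1, if_pos h2] at hx
        rcases ih _ x hx with h | ⟨ht, hn⟩
        · rcases List.mem_append.mp h with h' | h'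
          · exact Or.inl h'
          · rcases List.mem_singleton.mp h' with rfl
            exact Or.inr ⟨List.mem_cons_self, h2⟩
        · exact Or.inr ⟨List.mem_cons_of_mem _ ht, hn⟩
      · rw [bfsPush, if_neg h1, if_neg h2] at hx
        rcases ih st x hx with h | ⟨ht, hn⟩
        · exact Or.inl h
        · exact Or.inr ⟨List.mem_cons_of_mem _ ht, hn⟩

theorem bfsPush_sub2 (cx cy : Int) : ∀ (l : List (Int × Int))
    (st : List (Int × Int) × PySem.Set (Int × Int)) (x : Int × Int),
    x ∈ (List.foldl (bfsPush cx cy) st l).2 →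
    x ∈ st.2 ∨ (x ∈ l ∧ (cx - x.1).natAbs + (cy - x.2).natAbs ≤ 1000 ∧
      x ∈ (List.foldl (bfsPush cx cy) st l).1) := by
  intro l
  induction l with
  | nil => intro st x hx; exact Or.inl (by simpa using hx)
  | cons a t ih =>
    intro st x hx
    simp only [List.foldl_cons] at hx ⊢
    by_cases h1 : PySem.Set.contains st.2 a = true
    · rw [bfsPush, if_pos h1] at hx ⊢
      rcases ih st x hx with h | ⟨ht, hn, hq⟩
      · exact Or.inl h
      · exact Or.inr ⟨List.mem_cons_of_mem _ ht, hn, hq⟩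
    · by_cases h2 : (cx - a.1).natAbs + (cy - a.2).natAbs ≤ 1000
      · rw [bfsPush, if_neg h1, if_pos h2] at hx ⊢
        rcases ih _ x hx with h | ⟨ht, hn, hq⟩
        · rcases (PySem.Set.mem_add _ _ _).mp h with h' | rfl
          · exact Or.inl h'
          · refine Or.inr ⟨List.mem_cons_self, h2, ?_⟩
            exact bfsPush_mono1 cx cy t _ x (List.mem_append_right _ List.mem_cons_self)
        · exact Or.inr ⟨List.mem_cons_of_mem _ ht, hn, hq⟩
      · rw [bfsPush, if_neg h1, if_neg h2] at hx ⊢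
        rcases ih st x hx with h | ⟨ht, hn, hq⟩
        · exact Or.inl h
        · exact Or.inr ⟨List.mem_cons_of_mem _ ht, hn, hq⟩

theorem bfsPush_expand (cx cy : Int) : ∀ (l : List (Int × Int))
    (st : List (Int × Int) × PySem.Set (Int × Int)) (x : Int × Int),
    x ∈ l → (cx - x.1).natAbs + (cy - x.2).natAbs ≤ 1000 →
    x ∈ (List.foldl (bfsPush cx cy) st l).2 := by
  intro l
  induction l with
  | nil => intro st x hx; cases hx
  | cons a t ih =>
    intro st x hx hn
    simp only [List.foldl_cons]
    rcases List.mem_cons.mp hx with rfl | ht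
    · apply bfsPush_mono2
      by_cases h : PySem.Set.contains st.2 x = true
      · rw [bfsPush, if_pos h]; exact (PySem.Set.contains_iff _ _).mp h
      · rw [bfsPush, if_neg h, if_pos hn]
        exact (PySem.Set.mem_add _ _ _).mpr (Or.inr rfl)
    · exact ih _ x ht hn

theorem pvInv_step (coords : List (Int × Int)) (fx fy cx cy : Int)
    (rest : List (Int × Int)) (v : PySem.Set (Int × Int))
    (hnf : ¬((cx - fx).natAbs + (cy - fy).natAbs ≤ 1000))
    (hinv : pvInv coords fx fy ((cx, cy) :: rest) v) :
    pvInv coords fx fy (bfsStep cx cy coords (rest, v)).1 (bfsStep cx cy coords (rest, v)).2 := by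
  intro c hc
  simp only [bfsStep] at hc ⊢
  rcases bfsPush_sub2 cx cy coords (rest, v) c hc with hcv | ⟨_, _, hq⟩
  · rcases hinv c hcv with hcq | ⟨hn, hexp⟩
    · rcases List.mem_cons.mp hcq with rfl | hcr
      · exact Or.inr ⟨by simpa using hnf,
          fun c' hc' hnear => bfsPush_expand cx cy coords _ c' hc' (by simpa using hnear)⟩
      · exact Or.inl (bfsPush_mono1 cx cy coords (rest, v) c hcr)
    · exact Or.inr ⟨hn, fun c' hc' hnear =>
        bfsPush_mono2 cx cy coords (rest, v) c' (hexp c' hc' hnear)⟩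
  · exact Or.inl hq

theorem pvFrom_step (coords : List (Int × Int)) (cx cy : Int)
    (rest : List (Int × Int)) (v : PySem.Set (Int × Int)) (p : Int × Int)
    (h : PvFrom coords ((cx, cy) :: rest) v p) :
    p = (cx, cy) ∨ PvFrom coords (bfsStep cx cy coords (rest, v)).1
      (bfsStep cx cy coords (rest, v)).2 p := by
  induction h with
  | base_q hp =>
    rcases List.mem_cons.mp hp with rfl | h'
    · exact Or.inl rfl
    · exact Or.inr (PvFrom.base_q (bfsPush_mono1 cx cy coords (rest, v) _ h'))
  | base_v hp => exact Or.inr (PvFrom.base_v (bfsPush_mono2 cx cy coords (rest, v) _ hp))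
  | step hr hmem hnear ih =>
    rcases ih with rfl | hf
    · exact Or.inr (PvFrom.base_v (bfsPush_expand cx cy coords _ _ hmem (by simpa using hnear)))
    · exact Or.inr (PvFrom.step hf hmem hnear)

theorem pv_bfsLoop_total (coords : List (Int × Int)) (fx fy : Int) :
    ∀ (q : List (Int × Int)) (v : PySem.Set (Int × Int)),
      bfsLoop coords fx fy q v = "happy" ∨ bfsLoop coords fx fy q v = "sad" := by
  intro q v
  fun_induction bfsLoop coords fx fy q v with
  | case1 => exact Or.inr rfl
  | case2 => exact Or.inl rfl
  | case3 _ _ _ _ _ _ ih => exact ih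

theorem pv_bfsLoop_sad (coords : List (Int × Int)) (fx fy : Int) :
    ∀ (q : List (Int × Int)) (v : PySem.Set (Int × Int)),
      bfsLoop coords fx fy q v = "sad" → pvInv coords fx fy q v →
      ∀ p, PvFrom coords q v p → ¬((p.1 - fx).natAbs + (p.2 - fy).natAbs ≤ 1000) := by
  intro q v
  fun_induction bfsLoop coords fx fy q v with
  | case1 v =>
    intro _ hinv p hp
    have key : ∀ p, PvFrom coords [] v p →
        p ∈ v ∧ ¬((p.1 - fx).natAbs + (p.2 - fy).natAbs ≤ 1000) := by
      intro p hp
      induction hp with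
      | base_q h => exact absurd h List.not_mem_nil
      | base_v h =>
        rcases hinv _ h with h0 | ⟨hn, _⟩
        · exact absurd h0 List.not_mem_nil
        · exact ⟨h, hn⟩
      | step hr hmem hnear ihr =>
        obtain ⟨hrv, _⟩ := ihr
        rcases hinv _ hrv with h0 | ⟨_, hexp⟩
        · exact absurd h0 List.not_mem_nil
        have hpv := hexp _ hmem hnear
        rcases hinv _ hpv with h0 | ⟨hn, _⟩
        · exact absurd h0 List.not_mem_nil
        · exact ⟨hpv, hn⟩
    exact (key p hp).2
  | case2 => intro h; simp at h
  | case3 cx cy rest v hnear st ih =>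
    intro hsad hinv p hp
    have hinv' := pvInv_step coords fx fy cx cy rest v hnear hinv
    rcases pvFrom_step coords cx cy rest v p hp with rfl | hf
    · simpa using hnear
    · exact ih hsad hinv' p hf

theorem pv_bfsLoop_happy (sx sy : Int) (coords : List (Int × Int)) (fx fy : Int) :
    ∀ (q : List (Int × Int)) (v : PySem.Set (Int × Int)),
      (∀ u ∈ q, PvReach sx sy coords u) →
      bfsLoop coords fx fy q v = "happy" →
      ∃ p, PvReach sx sy coords p ∧ (p.1 - fx).natAbs + (p.2 - fy).natAbs ≤ 1000 := by
  intro q v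
  fun_induction bfsLoop coords fx fy q v with
  | case1 => intro _ h; simp at h
  | case2 cx cy rest v hc =>
    intro hq _
    exact ⟨(cx, cy), hq _ List.mem_cons_self, by simpa using hc⟩
  | case3 cx cy rest v hnear st ih =>
    intro hq hh
    apply ih ?_ hh
    intro u hu
    rcases bfsPush_sub1 cx cy coords (rest, v) u hu with hr | ⟨hmem, hn⟩
    · exact hq u (List.mem_cons_of_mem _ hr)
    · exact PvReach.step (hq _ List.mem_cons_self) hmem (by simpa using hn)

theorem pvReach_from (sx sy : Int) (coords : List (Int × Int)) (p : Int × Int)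
    (h : PvReach sx sy coords p) : PvFrom coords [(sx, sy)] [] p := by
  induction h with
  | start => exact PvFrom.base_q List.mem_cons_self
  | step hr hmem hnear ih => exact PvFrom.step ih hmem hnear

theorem satPass_sound (sx sy : Int) (coords : List (Int × Int)) :
    ∀ (l : List (Int × Int)) (st : List (Int × Int) × Bool),
      (∀ p ∈ l, p ∈ coords) → (∀ x ∈ st.1, PvReach sx sy coords x) →
      ∀ x ∈ (List.foldl satPush st l).1, PvReach sx sy coords x := by
  intro l
  induction l with
  | nil => intro st _ hinv x hx; exact hinv x (by simpa using hx)
  | cons a t ih =>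
    intro st hsub hinv x hx
    have hsub' : ∀ p ∈ t, p ∈ coords := fun p hp => hsub p (List.mem_cons_of_mem _ hp)
    simp only [List.foldl_cons] at hx
    by_cases hm : a ∈ st.1
    · rw [satPush, if_pos hm] at hx; exact ih st hsub' hinv x hx
    · by_cases hany : st.1.any
        (fun q => decide ((a.1 - q.1).natAbs + (a.2 - q.2).natAbs ≤ 1000)) = true
      · rw [satPush, if_neg hm, if_pos hany] at hx
        obtain ⟨w, hw, hwd⟩ := List.any_eq_true.mp hany
        have hwn := of_decide_eq_true hwd
        have hra : PvReach sx sy coords a := by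
          refine PvReach.step (hinv w hw) (hsub a List.mem_cons_self) ?_
          omega
        refine ih _ hsub' ?_ x hx
        intro y hy
        rcases List.mem_append.mp hy with hy' | hy'
        · exact hinv y hy'
        · rcases List.mem_singleton.mp hy' with rfl; exact hra
      · rw [satPush, if_neg hm, if_neg hany] at hx; exact ih st hsub' hinv x hx

theorem satPass_flagmono : ∀ (l : List (Int × Int)) (st : List (Int × Int) × Bool),
    st.2 = true → (List.foldl satPush st l).2 = true := by
  intro l
  induction l with
  | nil => intro st h; simpa using h
  | cons a t ih =>
    intro st h
    simp only [List.foldl_cons]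
    apply ih
    unfold satPush
    split
    · exact h
    · split
      · rfl
      · exact h

theorem satPass_nochange : ∀ (l : List (Int × Int)) (st : List (Int × Int) × Bool),
    (List.foldl satPush st l).2 = false → (List.foldl satPush st l).1 = st.1 := by
  intro l
  induction l with
  | nil => intro st _; rfl
  | cons a t ih =>
    intro st h
    simp only [List.foldl_cons] at h ⊢
    by_cases hm : a ∈ st.1
    · rw [satPush, if_pos hm] at h ⊢; exact ih st h
    · by_cases hany : st.1.any
        (fun q => decide ((a.1 - q.1).natAbs + (a.2 - q.2).natAbs ≤ 1000)) = true
      · rw [satPush, if_neg hm, if_pos hany] at h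
        rw [satPass_flagmono t (st.1 ++ [a], true) rfl] at h
        cases h
      · rw [satPush, if_neg hm, if_neg hany] at h ⊢; exact ih st h

theorem satPass_closed : ∀ (l : List (Int × Int)) (st : List (Int × Int) × Bool),
    (List.foldl satPush st l).2 = false →
    ∀ p ∈ l, p ∈ st.1 ∨ st.1.any
      (fun q => decide ((p.1 - q.1).natAbs + (p.2 - q.2).natAbs ≤ 1000)) = false := by
  intro l
  induction l with
  | nil => intro st _ p hp; cases hp
  | cons a t ih =>
    intro st h p hp
    simp only [List.foldl_cons] at h
    by_cases hm : a ∈ st.1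
    · rw [satPush, if_pos hm] at h
      rcases List.mem_cons.mp hp with rfl | ht
      · exact Or.inl hm
      · exact ih st h p ht
    · by_cases hany : st.1.any
        (fun q => decide ((a.1 - q.1).natAbs + (a.2 - q.2).natAbs ≤ 1000)) = true
      · rw [satPush, if_neg hm, if_pos hany] at h
        rw [satPass_flagmono t (st.1 ++ [a], true) rfl] at h
        cases h
      · rw [satPush, if_neg hm, if_neg hany] at h
        rcases List.mem_cons.mp hp with rfl | ht
        · exact Or.inr (Bool.not_eq_true _ ▸ hany)
        · exact ih st h p ht

theorem satLoop_mono (coords : List (Int × Int)) :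
    ∀ (reach : List (Int × Int)) (x : Int × Int), x ∈ reach → x ∈ satLoop coords reach := by
  intro reach
  fun_induction satLoop coords reach with
  | case1 reach st h ih =>
    intro x hx
    exact ih x (satPass_mono coords (reach, false) x hx)
  | case2 reach st h =>
    intro x hx
    exact satPass_mono coords (reach, false) x hx

theorem satLoop_sound (sx sy : Int) (coords : List (Int × Int)) :
    ∀ (reach : List (Int × Int)), (∀ x ∈ reach, PvReach sx sy coords x) →
      ∀ x ∈ satLoop coords reach, PvReach sx sy coords x := by
  intro reach
  fun_induction satLoop coords reach with
  | case1 reach st h ih =>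
    intro hinv x hx
    exact ih (satPass_sound sx sy coords coords (reach, false) (fun _ hp => hp) hinv) x hx
  | case2 reach st h =>
    intro hinv x hx
    exact satPass_sound sx sy coords coords (reach, false) (fun _ hp => hp) hinv x hx

theorem satLoop_closed (coords : List (Int × Int)) :
    ∀ (reach : List (Int × Int)) (p : Int × Int), p ∈ coords →
      (∃ q ∈ satLoop coords reach, (p.1 - q.1).natAbs + (p.2 - q.2).natAbs ≤ 1000) →
      p ∈ satLoop coords reach := by
  intro reach
  fun_induction satLoop coords reach with
  | case1 reach st h ih => exact ih
  | case2 reach st h =>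
    intro p hp hex
    have hfalse : (List.foldl satPush (reach, false) coords).2 = false := by
      simpa [satPass] using h
    have hnc := satPass_nochange coords (reach, false) hfalse
    rcases satPass_closed coords (reach, false) hfalse p hp with hin | hany
    · show p ∈ (List.foldl satPush (reach, false) coords).1
      rw [hnc]; exact hin
    · obtain ⟨q, hq, hqn⟩ := hex
      have hq' : q ∈ reach := by
        have hq2 : q ∈ (List.foldl satPush (reach, false) coords).1 := hq
        rwa [hnc] at hq2
      have : reach.any
          (fun q => decide ((p.1 - q.1).natAbs + (p.2 - q.2).natAbs ≤ 1000)) = true :=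
        List.any_eq_true.mpr ⟨q, hq', decide_eq_true hqn⟩
      rw [this] at hany
      cases hany

theorem pvReach_mem_sat (sx sy : Int) (coords : List (Int × Int)) :
    ∀ p, PvReach sx sy coords p → p ∈ satLoop coords [(sx, sy)] := by
  intro p h
  induction h with
  | start => exact satLoop_mono coords _ _ List.mem_cons_self
  | step hr hmem hnear ih =>
    refine satLoop_closed coords _ _ hmem ⟨_, ih, ?_⟩
    rename_i hnear' _
    omega

-- ===== VERDICT (by name: the statement is the Claim_ definition above) =====
theorem bfs_spec : Claim_equal_bfs := by
  intro sx sy coords fx fy _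
  unfold Spec_bfs bfs bfs_alt
  by_cases hany : (satLoop coords [(sx, sy)]).any
      (fun q => decide ((q.1 - fx).natAbs + (q.2 - fy).natAbs ≤ 1000)) = true
  · rw [if_pos hany]
    obtain ⟨q, hqR, hqd⟩ := List.any_eq_true.mp hany
    have hnear := of_decide_eq_true hqd
    have hreach : PvReach sx sy coords q := by
      refine satLoop_sound sx sy coords [(sx, sy)] ?_ q hqR
      intro x hx
      rcases List.mem_singleton.mp hx with rfl
      exact PvReach.start
    rcases pv_bfsLoop_total coords fx fy [(sx, sy)] PySem.Set.empty with hh | hs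
    · exact hh
    · exact absurd hnear (pv_bfsLoop_sad coords fx fy _ _ hs
        (fun c hc => absurd hc List.not_mem_nil)
        q (pvReach_from sx sy coords q hreach))
  · rw [if_neg hany]
    rcases pv_bfsLoop_total coords fx fy [(sx, sy)] PySem.Set.empty with hh | hs
    · have hstart : ∀ u ∈ [((sx : Int), sy)], PvReach sx sy coords u := by
        intro u hu
        rcases List.mem_singleton.mp hu with rfl
        exact PvReach.start
      obtain ⟨p, hr, hn⟩ := pv_bfsLoop_happy sx sy coords fx fy _ _ hstart hh
      exact absurd (List.any_eq_true.mpr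
        ⟨p, pvReach_mem_sat sx sy coords p hr, decide_eq_true hn⟩) hany
    · exact hs
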